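-- pv_equiv track=rewrite | github.com/mesyedjunaidali/cnvdetection | code15.py | extract_sequence
-- ===== SOURCE A (Python) =====
-- def extract_sequence(data, segments):
--     result = {}
--     for start, end in segments:
--         sequence = ""
--         for position, nucleotide in data:
--             if start <= position <= end:
--                 sequence += nucleotide
--         result[(start, end)] = sequence
--     return result
-- ===== SOURCE B (Python) =====
-- def extract_sequence(data, segments):
--     # Sort the data points by position once; answer each segment by binary
--     # search over the sorted positions, then restore original data order.
--     indexed = sorted(enumerate(data), key=lambda item: item[1][0])
--     positions = [item[1][0] for item in indexed]
--
--     def lower(x):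
--         # first index i with positions[i] >= x
--         lo, hi = 0, len(positions)
--         while lo < hi:
--             mid = (lo + hi) // 2
--             if positions[mid] < x:
--                 lo = mid + 1
--             else:
--                 hi = mid
--         return lo
--
--     result = {}
--     for start, end in segments:
--         hits = sorted(indexed[lower(start):lower(end + 1)], key=lambda item: item[0])
--         result[(start, end)] = "".join(item[1][1] for item in hits)
--     return result
-- ===== Notes on version B (the rewrite author's own statement) =====
-- stated objective: alternative
-- what changed: Instead of rescanning the whole data list for every segment, B sorts the data points by position once, binary-searches each segment's [start,end] range in the sorted positions, and re-sorts the matched points by original index to restore A's data-order concatenation.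
import Mathlib
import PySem

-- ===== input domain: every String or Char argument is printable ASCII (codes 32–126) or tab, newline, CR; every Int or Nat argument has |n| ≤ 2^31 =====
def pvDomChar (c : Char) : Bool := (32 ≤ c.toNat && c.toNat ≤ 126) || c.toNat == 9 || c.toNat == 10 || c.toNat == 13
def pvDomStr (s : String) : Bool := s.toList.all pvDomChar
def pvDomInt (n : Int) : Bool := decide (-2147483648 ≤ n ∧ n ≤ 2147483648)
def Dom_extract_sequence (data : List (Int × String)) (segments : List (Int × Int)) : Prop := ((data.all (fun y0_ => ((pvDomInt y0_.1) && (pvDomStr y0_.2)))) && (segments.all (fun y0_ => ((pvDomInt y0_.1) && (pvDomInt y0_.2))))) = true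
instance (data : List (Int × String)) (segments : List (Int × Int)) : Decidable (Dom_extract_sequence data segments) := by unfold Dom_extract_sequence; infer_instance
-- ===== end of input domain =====

-- B replaces A's full rescan of the data per segment by: sort the data points by
-- position once, binary-search each segment's position range, and restore data
-- order by re-sorting the matched points by their original index.

-- ===== PORT A =====
def extract_sequence (data : List (Int × String)) (segments : List (Int × Int)) : List (Int × Int × String) :=
  let result : PySem.Dict (Int × Int) String :=
    segments.foldl (fun d se =>
      d.insert (se.1, se.2)
        (data.foldl (fun s pn => if se.1 ≤ pn.1 ∧ pn.1 ≤ se.2 then s ++ pn.2 else s) ""))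
      PySem.Dict.empty
  result.items.map (fun kv => (kv.1.1, kv.1.2, kv.2))

-- ===== PORT B =====
-- the hand-written 'lower' binary-search loop of Source B (while lo < hi …); its lo, hi
-- are nonnegative ints; positions[mid] is read only with lo ≤ mid < hi ≤ len, always
-- in range, so the read is modelled exactly by getD
def pvLower (positions : List Int) (x : Int) (lo hi : Nat) : Nat :=
  if lo < hi then
    let mid := (lo + hi) / 2
    if positions.getD mid 0 < x then pvLower positions x (mid + 1) hi
    else pvLower positions x lo mid
  else lo
termination_by hi - lo
decreasing_by all_goals omega

def extract_sequence_alt (data : List (Int × String)) (segments : List (Int × Int)) : List (Int × Int × String) :=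
  let indexed := PySem.List.sorted (PySem.List.enumerate data) (fun item => item.2.1)
  let positions := indexed.map (fun item => item.2.1)
  let result : PySem.Dict (Int × Int) String :=
    segments.foldl (fun d se =>
      let hits := PySem.List.sorted
        (PySem.List.slice indexed
          (some (pvLower positions se.1 0 positions.length : Int))
          (some (pvLower positions (se.2 + 1) 0 positions.length : Int)))
        (fun item => item.1)
      d.insert (se.1, se.2) (PySem.Str.join "" (hits.map (fun item => item.2.2))))
      PySem.Dict.empty
  result.items.map (fun kv => (kv.1.1, kv.1.2, kv.2))

-- ===== PRECONDITION & SPEC =====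
def Spec_extract_sequence (data : List (Int × String)) (segments : List (Int × Int)) (out : List (Int × Int × String)) : Prop := out = extract_sequence_alt data segments
instance (data : List (Int × String)) (segments : List (Int × Int)) (out : List (Int × Int × String)) : Decidable (Spec_extract_sequence data segments out) := by unfold Spec_extract_sequence; infer_instance

-- ===== CLAIM (what is proved, stated in full; the proofs are below) =====
def Claim_equal_extract_sequence : Prop := ∀ (data : List (Int × String)) (segments : List (Int × Int)), Dom_extract_sequence data segments → Spec_extract_sequence data segments (extract_sequence data segments)

-- ===== LEMMAS AND PROOFS =====

-- binary-search invariant: everything left of the result is < x, everything right is ≥ x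
theorem pvLower_inv (l : List Int) (x : Int) (hs : l.Pairwise (· ≤ ·)) :
    ∀ (n lo hi : Nat), hi - lo ≤ n → lo ≤ hi → hi ≤ l.length →
    (∀ j, j < lo → l.getD j 0 < x) → (∀ j, hi ≤ j → j < l.length → x ≤ l.getD j 0) →
    pvLower l x lo hi ≤ l.length ∧
      (∀ j, j < pvLower l x lo hi → l.getD j 0 < x) ∧
      (∀ j, pvLower l x lo hi ≤ j → j < l.length → x ≤ l.getD j 0) := by
  have hmono : ∀ (i j : Nat), i ≤ j → j < l.length → l.getD i 0 ≤ l.getD j 0 := by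
    intro i j hij hj
    rcases eq_or_lt_of_le hij with rfl | hlt
    · exact le_refl _
    · have hi : i < l.length := lt_trans hlt hj
      rw [l.getD_eq_getElem 0 hi, l.getD_eq_getElem 0 hj]
      exact List.pairwise_iff_getElem.1 hs i j hi hj hlt
  intro n
  induction n with
  | zero =>
    intro lo hi hfuel hle hlen h1 h2
    have : ¬ lo < hi := by omega
    rw [pvLower, if_neg this]
    exact ⟨by omega, h1, fun j hj hjl => h2 j (by omega) hjl⟩
  | succ n ih =>
    intro lo hi hfuel hle hlen h1 h2
    by_cases hlt : lo < hi
    · rw [pvLower, if_pos hlt]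
      simp only []
      set mid := (lo + hi) / 2 with hmid
      have hmlo : lo ≤ mid := by omega
      have hmhi : mid < hi := by omega
      have hmlen : mid < l.length := by omega
      by_cases hc : l.getD mid 0 < x
      · rw [if_pos hc]
        refine ih (mid + 1) hi (by omega) (by omega) hlen ?_ h2
        intro j hj
        exact lt_of_le_of_lt (hmono j mid (by omega) hmlen) hc
      · rw [if_neg hc]
        refine ih lo mid (by omega) (by omega) (by omega) h1 ?_
        intro j hj hjl
        exact le_trans (not_lt.1 hc) (hmono mid j hj hjl)
    · rw [pvLower, if_neg hlt]
      exact ⟨by omega, h1, fun j hj hjl => h2 j (by omega) hjl⟩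

-- the result of the search is the number of elements < x
theorem pvLower_eq_countP (l : List Int) (x : Int) (hs : l.Pairwise (· ≤ ·)) :
    pvLower l x 0 l.length = l.countP (fun e => decide (e < x)) := by
  obtain ⟨hle, h1, h2⟩ := pvLower_inv l x hs l.length 0 l.length (by omega) (by omega) (le_refl _)
    (by omega) (fun j hj hjl => by omega)
  set r := pvLower l x 0 l.length with hr
  conv_rhs => rw [← l.take_append_drop r, List.countP_append]
  have hT : (l.take r).countP (fun e => decide (e < x)) = (l.take r).length := by
    rw [List.countP_eq_length]
    intro e he
    obtain ⟨i, hi, rfl⟩ := List.mem_iff_getElem.1 he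
    have hlt : (l.take r).length = min r l.length := List.length_take
    have hilen : i < l.length := by omega
    rw [List.getElem_take]
    have := h1 i (by omega)
    rw [l.getD_eq_getElem 0 hilen] at this
    simpa using this
  have hD : (l.drop r).countP (fun e => decide (e < x)) = 0 := by
    rw [List.countP_eq_zero]
    intro e he
    obtain ⟨i, hi, rfl⟩ := List.mem_iff_getElem.1 he
    have hld : (l.drop r).length = l.length - r := List.length_drop
    have hilen : r + i < l.length := by omega
    rw [List.getElem_drop]
    have := h2 (r + i) (by omega) hilen
    rw [l.getD_eq_getElem 0 hilen] at this
    simp; omega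
  rw [hT, hD, List.length_take]
  omega

-- slicing a key-sorted list between the two counts is filtering by the key range
theorem pv_take_drop_filter {α : Type} (k : α → Int) (a c : Int) :
    ∀ (l : List α), l.Pairwise (fun e f => k e ≤ k f) →
    ((l.take (l.countP fun e => decide (k e < c))).drop (l.countP fun e => decide (k e < a)))
      = l.filter (fun e => decide (a ≤ k e) && decide (k e < c)) := by
  intro l
  induction l with
  | nil => simp
  | cons e t ih =>
    intro hp
    obtain ⟨he, hpt⟩ := List.pairwise_cons.1 hp
    by_cases hc1 : k e < a
    · by_cases hc2 : k e < c
      · simp only [List.countP_cons, hc1, hc2, decide_true, if_true]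
        simp only [List.take_succ_cons, List.drop_succ_cons, List.filter_cons]
        have : (decide (a ≤ k e) && decide (k e < c)) = false := by simp; omega
        rw [this, ih hpt]
        simp
      · have hct : t.countP (fun e => decide (k e < c)) = 0 := by
          rw [List.countP_eq_zero]; intro f hf; have := he f hf; simp; omega
        have hcc : (e :: t).countP (fun e => decide (k e < c)) = 0 := by
          simp only [List.countP_cons, hct, hc2]; simp
        rw [hcc]
        simp only [List.take_zero, List.drop_nil]
        symm; rw [List.filter_eq_nil_iff]
        intro f hf
        rcases List.mem_cons.1 hf with rfl | hft
        · simp; omega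
        · have := he f hft; simp; omega
    · have hat : t.countP (fun e => decide (k e < a)) = 0 := by
        rw [List.countP_eq_zero]; intro f hf; have := he f hf; simp; omega
      have hac : (e :: t).countP (fun e => decide (k e < a)) = 0 := by
        simp only [List.countP_cons, hat, hc1]; simp
      rw [hac, List.drop_zero]
      by_cases hc2 : k e < c
      · simp only [List.countP_cons, hc2, decide_true, if_true]
        simp only [List.take_succ_cons, List.filter_cons]
        have hkeep : (decide (a ≤ k e) && decide (k e < c)) = true := by simp; omega
        rw [hkeep]
        have := ih hpt
        rw [hat, List.drop_zero] at this
        rw [this]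
        simp
      · have hct : t.countP (fun e => decide (k e < c)) = 0 := by
          rw [List.countP_eq_zero]; intro f hf; have := he f hf; simp; omega
        have hcc : (e :: t).countP (fun e => decide (k e < c)) = 0 := by
          simp only [List.countP_cons, hct, hc2]; simp
        rw [hcc, List.take_zero]
        symm; rw [List.filter_eq_nil_iff]
        intro f hf
        rcases List.mem_cons.1 hf with rfl | hft
        · simp; omega
        · have := he f hft; simp; omega

-- a filtered enumeration, re-sorted by index, is the filtered enumeration in data order
theorem pv_hits_eq (data : List (Int × String)) (P : Int × String → Bool) :
    PySem.List.sorted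
        ((PySem.List.sorted (PySem.List.enumerate data) (fun item => item.2.1)).filter
          (fun item => P item.2))
        (fun item => item.1)
      = (PySem.List.enumerate data).filter (fun item => P item.2) := by
  apply PySem.List.sorted_eq_of_perm_of_pairwise_lt
  · exact (PySem.List.sorted_perm (PySem.List.enumerate data) (fun item => item.2.1) false).symm.filter _
  · exact (PySem.List.pairwise_lt_enumerate data 0).sublist List.filter_sublist

-- dropping the indices again
theorem pv_map_filter_enumerate (data : List (Int × String)) (P : Int × String → Bool) :
    ((PySem.List.enumerate data).filter (fun item => P item.2)).map (fun item => item.2.2)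
      = (data.filter P).map (fun pn => pn.2) := by
  have h1 : ((PySem.List.enumerate data).filter (fun item => P item.2)).map
      (fun item : Int × Int × String => item.2)
      = data.filter P := by
    have h2 := List.filter_map (f := fun x : Int × (Int × String) => x.2) (p := P)
      (l := PySem.List.enumerate data)
    rw [PySem.List.map_snd_enumerate data 0] at h2
    rw [h2]
    rfl
  calc ((PySem.List.enumerate data).filter (fun item => P item.2)).map (fun item => item.2.2)
      = (((PySem.List.enumerate data).filter (fun item => P item.2)).map
          (fun item : Int × Int × String => item.2)).map (fun pn => pn.2) := by
        rw [List.map_map]; rfl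
    _ = (data.filter P).map (fun pn => pn.2) := by rw [h1]

theorem pv_flatten_intersperse_nil : ∀ (l : List (List Char)),
    (List.intersperse ([] : List Char) l).flatten = l.flatten := by
  intro l
  induction l with
  | nil => simp
  | cons x t ih =>
    cases t with
    | nil => simp
    | cons y u => simp_all [List.intersperse_cons₂]

theorem pv_join_nil : PySem.Str.join "" ([] : List String) = "" := by
  simp [PySem.Str.join, PySem.Chars.join]
  rfl

theorem pv_join_cons (x : String) (xs : List String) :
    PySem.Str.join "" (x :: xs) = x ++ PySem.Str.join "" xs := by
  apply String.toList_inj.mp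
  simp [PySem.Str.join, PySem.Chars.join, List.intercalate, String.toList_append,
    pv_flatten_intersperse_nil]

-- A's string loop is the join of the kept nucleotides
theorem pv_foldl_join (P : Int × String → Prop) [DecidablePred P] :
    ∀ (l : List (Int × String)) (s : String),
    l.foldl (fun s pn => if P pn then s ++ pn.2 else s) s
      = s ++ PySem.Str.join "" ((l.filter (fun pn => decide (P pn))).map (fun pn => pn.2)) := by
  intro l
  induction l with
  | nil => intro s; simp [pv_join_nil]
  | cons pn t ih =>
    intro s
    by_cases hp : P pn
    · simp only [List.foldl_cons, if_pos hp, List.filter_cons, decide_eq_true hp, if_true]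
      rw [ih, List.map_cons, pv_join_cons, String.append_assoc]
    · simp only [List.foldl_cons, if_neg hp, List.filter_cons]
      have : (decide (P pn)) = false := decide_eq_false hp
      rw [this]
      simp only [Bool.false_eq_true, if_false]
      exact ih s

-- per-segment value equality: A's scan of data equals B's binary-searched slice
theorem pv_value_eq (data : List (Int × String)) (se : Int × Int) :
    data.foldl (fun s pn => if se.1 ≤ pn.1 ∧ pn.1 ≤ se.2 then s ++ pn.2 else s) ""
      = PySem.Str.join ""
          ((PySem.List.sorted
            (PySem.List.slice (PySem.List.sorted (PySem.List.enumerate data) (fun item => item.2.1))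
              (some ((pvLower
                ((PySem.List.sorted (PySem.List.enumerate data) (fun item => item.2.1)).map (fun item => item.2.1))
                se.1 0
                ((PySem.List.sorted (PySem.List.enumerate data) (fun item => item.2.1)).map (fun item => item.2.1)).length : Nat) : Int))
              (some ((pvLower
                ((PySem.List.sorted (PySem.List.enumerate data) (fun item => item.2.1)).map (fun item => item.2.1))
                (se.2 + 1) 0
                ((PySem.List.sorted (PySem.List.enumerate data) (fun item => item.2.1)).map (fun item => item.2.1)).length : Nat) : Int)))
            (fun item => item.1)).map (fun item => item.2.2)) := by
  set enum := PySem.List.enumerate data with henum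
  set indexed := PySem.List.sorted enum (fun item => item.2.1) with hindexed
  have hpair : (indexed.map (fun item => item.2.1)).Pairwise (· ≤ ·) :=
    PySem.List.sorted_map_key_pairwise enum (fun item => item.2.1)
  have hlo : pvLower (indexed.map (fun item => item.2.1)) se.1 0 (indexed.map (fun item => item.2.1)).length
      = indexed.countP (fun e => decide (e.2.1 < se.1)) := by
    rw [pvLower_eq_countP _ _ hpair, List.countP_map]; rfl
  have hhi : pvLower (indexed.map (fun item => item.2.1)) (se.2 + 1) 0 (indexed.map (fun item => item.2.1)).length
      = indexed.countP (fun e => decide (e.2.1 < se.2 + 1)) := by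
    rw [pvLower_eq_countP _ _ hpair, List.countP_map]; rfl
  rw [hlo, hhi, PySem.List.slice_natCast, ← List.drop_take]
  have hfil := pv_take_drop_filter (fun item : Int × (Int × String) => item.2.1) se.1 (se.2 + 1)
    indexed (PySem.List.sorted_pairwise enum (fun item => item.2.1))
  rw [hfil]
  have hpred : (fun e : Int × (Int × String) => decide (se.1 ≤ e.2.1) && decide (e.2.1 < se.2 + 1))
      = (fun e : Int × (Int × String) => decide (se.1 ≤ e.2.1 ∧ e.2.1 ≤ se.2)) := by
    funext e
    by_cases h1 : se.1 ≤ e.2.1 <;> by_cases h2 : e.2.1 ≤ se.2 <;> simp [h1, h2]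
  rw [hpred]
  rw [pv_hits_eq data (fun pn => decide (se.1 ≤ pn.1 ∧ pn.1 ≤ se.2))]
  rw [pv_map_filter_enumerate data (fun pn => decide (se.1 ≤ pn.1 ∧ pn.1 ≤ se.2))]
  rw [pv_foldl_join (fun pn => se.1 ≤ pn.1 ∧ pn.1 ≤ se.2) data "", String.empty_append]

-- ===== VERDICT (by name: the statement is the Claim_ definition above) =====
theorem extract_sequence_spec : Claim_equal_extract_sequence := by
  intro data segments _
  unfold Spec_extract_sequence extract_sequence extract_sequence_alt
  simp only []
  congr 1
  congr 1
  apply PySem.List.foldl_congr_mem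
  intro d se _
  rw [pv_value_eq data se]
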